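-- pv_equiv track=rewrite | github.com/schustemtf/SAT | check_solver.py | possible_propagations
-- ===== SOURCE A (Python) =====
-- def possible_propagations(cnf, assignments):
--     """
--     Return a list of units (literals) that is implied by the formula.
--     """
--     propagations = []
--     for clause in cnf:
--         if len(clause) == 1 and clause[0] not in assignments:
--             propagations.append(clause[0])
--         else:
--             assigned_opposite = [lit for lit in clause if -lit in assignments]
--             unassigned = [
--                 lit for lit in clause if abs(lit) not in [abs(x) for x in assignments]
--             ]
--             if len(assigned_opposite) == len(clause) - 1 and len(unassigned) == 1:
--                 propagations.append(unassigned[0])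
--     return propagations
-- ===== SOURCE B (Python) =====
-- def possible_propagations(cnf, assignments):
--     """
--     Return a list of units (literals) that is implied by the formula.
--
--     Instead of counting falsified/unassigned literals per clause, each
--     non-singleton clause is scanned with an early-exit search: a literal
--     whose variable is assigned but not falsified (i.e. a satisfying
--     literal) or a second unassigned literal immediately rules the clause
--     out; the clause propagates exactly when every literal but one is
--     falsified and the remaining one is unassigned.
--     """
--     lits = set(assignments)
--     avars = {abs(x) for x in assignments}
--
--     def find_unit(clause):
--         unit = None
--         for lit in clause:
--             if -lit in lits:
--                 continue  # falsified literal: keep scanning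
--             if abs(lit) in avars or unit is not None:
--                 return None  # satisfied literal, or a second unassigned one
--             unit = lit
--         return unit
--
--     out = []
--     for clause in cnf:
--         if len(clause) == 1:
--             if clause[0] not in lits:
--                 out.append(clause[0])
--         else:
--             u = find_unit(clause)
--             if u is not None:
--                 out.append(u)
--     return out
-- ===== Notes on version B (the rewrite author's own statement) =====
-- stated objective: alternative
-- what changed: A builds two filtered lists per clause (rescanning the assignment list, and rebuilding [abs(x) for x in assignments] for every literal) and compares their lengths; B precomputes two assignment sets once and replaces the counting entirely by an early-exit search for the unique non-falsified literal, aborting as soon as a satisfying literal or a second unassigned literal is seen.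
import Mathlib
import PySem

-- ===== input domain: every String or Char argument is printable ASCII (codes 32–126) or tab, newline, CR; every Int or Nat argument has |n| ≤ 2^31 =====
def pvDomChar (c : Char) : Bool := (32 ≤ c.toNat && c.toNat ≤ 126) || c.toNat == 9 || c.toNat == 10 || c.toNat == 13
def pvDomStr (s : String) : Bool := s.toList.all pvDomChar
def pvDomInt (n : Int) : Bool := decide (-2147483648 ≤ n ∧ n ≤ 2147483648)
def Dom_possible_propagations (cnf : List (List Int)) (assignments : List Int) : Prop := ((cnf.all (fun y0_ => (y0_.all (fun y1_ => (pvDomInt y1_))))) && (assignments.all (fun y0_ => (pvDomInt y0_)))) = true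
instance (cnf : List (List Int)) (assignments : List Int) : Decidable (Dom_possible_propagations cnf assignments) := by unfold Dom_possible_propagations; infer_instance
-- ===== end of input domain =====

-- B replaces A's per-clause pair of counted list comprehensions by two assignment
-- sets built once plus an early-exit search for the unique non-falsified literal.

-- ===== PORT A =====
def possible_propagations (cnf : List (List Int)) (assignments : List Int) : List Int :=
  cnf.foldl (fun propagations clause =>
    if clause.length = 1 ∧ clause.headI ∉ assignments then
      propagations ++ [clause.headI]
    else
      let assigned_opposite := clause.filter (fun lit => decide (-lit ∈ assignments))
      let unassigned := clause.filter (fun lit => decide (|lit| ∉ assignments.map (fun x => |x|)))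
      if (assigned_opposite.length : Int) = (clause.length : Int) - 1 ∧ unassigned.length = 1 then
        propagations ++ [unassigned.headI]
      else propagations) []

-- ===== PORT B =====
-- Source B's find_unit: the for-loop with its two early returns, as structural recursion
def findUnit (lits avars : PySem.Set Int) : List Int → Option Int → Option Int
  | [], unit => unit
  | lit :: rest, unit =>
    if -lit ∈ lits then findUnit lits avars rest unit       -- falsified: keep scanning
    else if |lit| ∈ avars ∨ unit.isSome then none           -- satisfied, or second unassigned
    else findUnit lits avars rest (some lit)

def possible_propagations_alt (cnf : List (List Int)) (assignments : List Int) : List Int :=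
  let lits := PySem.Set.ofList assignments
  let avars := PySem.Set.ofList (assignments.map (fun x => |x|))
  cnf.foldl (fun out clause =>
    if clause.length = 1 then
      if clause.headI ∈ lits then out else out ++ [clause.headI]
    else
      match findUnit lits avars clause none with
      | some u => out ++ [u]
      | none => out) []

-- ===== PRECONDITION & SPEC =====
def Spec_possible_propagations (cnf : List (List Int)) (assignments : List Int) (out : List Int) : Prop := out = possible_propagations_alt cnf assignments
instance (cnf : List (List Int)) (assignments : List Int) (out : List Int) : Decidable (Spec_possible_propagations cnf assignments out) := by unfold Spec_possible_propagations; infer_instance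

-- ===== CLAIM (what is proved, stated in full; the proofs are below) =====
def Claim_equal_possible_propagations : Prop := ∀ (cnf : List (List Int)) (assignments : List Int), Dom_possible_propagations cnf assignments → Spec_possible_propagations cnf assignments (possible_propagations cnf assignments)

-- ===== LEMMAS AND PROOFS =====

-- Closed form of B's early-exit scan: it returns a literal iff every literal of the
-- clause is falsified or unassigned and (counting the carried `unit`) exactly one is
-- unassigned.
theorem findUnit_eq (A clause : List Int) (unit : Option Int) :
    findUnit (PySem.Set.ofList A) (PySem.Set.ofList (A.map (fun x => |x|))) clause unit =
      if clause.all (fun lit => decide (-lit ∈ A) || decide (|lit| ∉ A.map (fun x => |x|))) then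
        match unit, clause.filter (fun lit => decide (|lit| ∉ A.map (fun x => |x|))) with
        | none, [] => none
        | none, [u] => some u
        | some x, [] => some x
        | _, _ => none
      else none := by
  induction clause generalizing unit with
  | nil => cases unit <;> rfl
  | cons lit rest ih =>
    by_cases hf : -lit ∈ A
    · have hv : |lit| ∈ A.map (fun x => |x|) := by
        have := List.mem_map_of_mem (f := fun x => |x|) hf
        simpa [abs_neg] using this
      have hstep : findUnit (PySem.Set.ofList A) (PySem.Set.ofList (A.map (fun x => |x|)))
            (lit :: rest) unit
          = findUnit (PySem.Set.ofList A) (PySem.Set.ofList (A.map (fun x => |x|))) rest unit := by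
        simp only [findUnit, PySem.Set.mem_ofList]
        rw [if_pos hf]
      have e1 : ((lit :: rest).all fun l => decide (-l ∈ A) || decide (|l| ∉ A.map (fun x => |x|)))
          = (rest.all fun l => decide (-l ∈ A) || decide (|l| ∉ A.map (fun x => |x|))) := by
        rw [List.all_cons, decide_eq_true hf, Bool.true_or, Bool.true_and]
      have e2 : (lit :: rest).filter (fun l => decide (|l| ∉ A.map (fun x => |x|)))
          = rest.filter (fun l => decide (|l| ∉ A.map (fun x => |x|))) := by
        rw [List.filter_cons, if_neg (by simpa using hv)]
      rw [hstep, ih, e1, e2]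
    · by_cases hv : |lit| ∈ A.map (fun x => |x|)
      · have hstep : findUnit (PySem.Set.ofList A) (PySem.Set.ofList (A.map (fun x => |x|)))
              (lit :: rest) unit = none := by
          simp only [findUnit, PySem.Set.mem_ofList]
          rw [if_neg hf, if_pos (Or.inl hv)]
        have e1 : ((lit :: rest).all fun l => decide (-l ∈ A) || decide (|l| ∉ A.map (fun x => |x|)))
            = false := by
          rw [List.all_cons, decide_eq_false hf, decide_eq_false (not_not_intro hv),
            Bool.false_or, Bool.false_and]
        rw [hstep, e1]
        rfl
      · have e2 : (lit :: rest).filter (fun l => decide (|l| ∉ A.map (fun x => |x|)))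
            = lit :: rest.filter (fun l => decide (|l| ∉ A.map (fun x => |x|))) := by
          rw [List.filter_cons, if_pos (by simpa using hv)]
        have e1 : ((lit :: rest).all fun l => decide (-l ∈ A) || decide (|l| ∉ A.map (fun x => |x|)))
            = (rest.all fun l => decide (-l ∈ A) || decide (|l| ∉ A.map (fun x => |x|))) := by
          rw [List.all_cons, decide_eq_true hv, Bool.or_true, Bool.true_and]
        cases unit with
        | some x =>
          have hstep : findUnit (PySem.Set.ofList A) (PySem.Set.ofList (A.map (fun x => |x|)))
                (lit :: rest) (some x) = none := by
            simp only [findUnit, PySem.Set.mem_ofList, Option.isSome_some]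
            rw [if_neg hf, if_pos (Or.inr trivial)]
          rw [hstep, e1, e2]
          by_cases hall : (rest.all fun l => decide (-l ∈ A) || decide (|l| ∉ A.map (fun x => |x|))) = true
          · rw [if_pos hall]
          · rw [if_neg hall]
        | none =>
          have hstep : findUnit (PySem.Set.ofList A) (PySem.Set.ofList (A.map (fun x => |x|)))
                (lit :: rest) none
              = findUnit (PySem.Set.ofList A) (PySem.Set.ofList (A.map (fun x => |x|))) rest
                  (some lit) := by
            simp only [findUnit, PySem.Set.mem_ofList, Option.isSome_none]
            rw [if_neg hf, if_neg (by simp [hv])]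
          rw [hstep, ih, e1, e2]
          by_cases hall : (rest.all fun l => decide (-l ∈ A) || decide (|l| ∉ A.map (fun x => |x|))) = true
          · rw [if_pos hall, if_pos hall]
            cases hfr : rest.filter (fun l => decide (|l| ∉ A.map (fun x => |x|))) with
            | nil => rfl
            | cons a t => cases t <;> rfl
          · rw [if_neg hall, if_neg hall]

-- The three per-literal statuses (falsified / unassigned / satisfying) partition a clause.
theorem filter_partition (A clause : List Int) :
    (clause.filter (fun lit => decide (-lit ∈ A))).length
      + (clause.filter (fun lit => decide (|lit| ∉ A.map (fun x => |x|)))).length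
      + (clause.filter (fun lit =>
          !(decide (-lit ∈ A)) && !(decide (|lit| ∉ A.map (fun x => |x|))))).length
      = clause.length := by
  induction clause with
  | nil => rfl
  | cons lit rest ih =>
    by_cases hf : -lit ∈ A
    · have hv : |lit| ∈ A.map (fun x => |x|) := by
        have := List.mem_map_of_mem (f := fun x => |x|) hf
        simpa [abs_neg] using this
      simp only [List.filter_cons, decide_eq_true hf, decide_eq_false (not_not_intro hv)]
      simp only [Bool.not_true, Bool.false_and, if_true, Bool.false_eq_true, if_false,
        List.length_cons]
      omega
    · by_cases hv : |lit| ∈ A.map (fun x => |x|)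
      · simp only [List.filter_cons, decide_eq_false hf, decide_eq_false (not_not_intro hv)]
        simp only [Bool.not_false, Bool.true_and, Bool.false_eq_true, if_false, if_true,
          List.length_cons]
        omega
      · simp only [List.filter_cons, decide_eq_false hf, decide_eq_true hv]
        simp only [Bool.not_false, Bool.not_true, Bool.true_and, Bool.false_eq_true, if_false,
          if_true, List.length_cons]
        omega

-- ===== VERDICT (by name: the statement is the Claim_ definition above) =====
theorem possible_propagations_spec : Claim_equal_possible_propagations := by
  intro cnf assignments _
  show possible_propagations cnf assignments = possible_propagations_alt cnf assignments
  unfold possible_propagations possible_propagations_alt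
  refine congrFun (congrFun (congrArg List.foldl (funext fun props => funext fun clause => ?_)) []) cnf
  dsimp only
  rw [findUnit_eq]
  by_cases h1 : clause.length = 1
  · obtain ⟨x, rfl⟩ := List.length_eq_one_iff.mp h1
    rw [if_pos (show [x].length = 1 from rfl)]
    by_cases hm : x ∈ assignments
    · have hx : |x| ∈ assignments.map (fun x => |x|) := List.mem_map_of_mem hm
      have e2 : [x].filter (fun lit => decide (|lit| ∉ assignments.map (fun x => |x|))) = [] := by
        rw [List.filter_cons, if_neg (by simpa using hx)]; rfl
      have hc : ¬(((([x].filter (fun lit => decide (-lit ∈ assignments))).length : Int)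
            = (([x].length : Int)) - 1)
          ∧ (([x].filter (fun lit => decide (|lit| ∉ assignments.map (fun x => |x|)))).length
            = 1)) := by rw [e2]; simp
      rw [if_neg (show ¬([x].length = 1 ∧ [x].headI ∉ assignments) by simp [hm]),
        if_neg hc,
        if_pos (show [x].headI ∈ PySem.Set.ofList assignments by
          simp [PySem.Set.mem_ofList, hm])]
    · rw [if_pos (show [x].length = 1 ∧ [x].headI ∉ assignments from ⟨rfl, by simpa using hm⟩),
        if_neg (show ¬([x].headI ∈ PySem.Set.ofList assignments) by
          simp [PySem.Set.mem_ofList, hm])]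
  · rw [if_neg (fun h : clause.length = 1 ∧ _ => h1 h.1), if_neg h1]
    have hpart := filter_partition assignments clause
    set F := clause.filter (fun lit => decide (-lit ∈ assignments)) with hF
    set U := clause.filter (fun lit => decide (|lit| ∉ assignments.map (fun x => |x|))) with hU
    set S := clause.filter (fun lit =>
        !(decide (-lit ∈ assignments)) && !(decide (|lit| ∉ assignments.map (fun x => |x|)))) with hS
    have hall : ((clause.all fun lit =>
          decide (-lit ∈ assignments) || decide (|lit| ∉ assignments.map (fun x => |x|))) = true)
        ↔ S = [] := by
      rw [hS, List.filter_eq_nil_iff, List.all_eq_true]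
      constructor
      · intro h lit hl hc
        have := h lit hl
        simp only [Bool.or_eq_true, decide_eq_true_eq] at this
        simp only [Bool.and_eq_true, Bool.not_eq_true', decide_eq_false_iff_not, not_not] at hc
        rcases this with h' | h'
        · exact hc.1 h'
        · exact h' hc.2
      · intro h lit hl
        by_contra hb
        simp only [Bool.or_eq_true, decide_eq_true_eq, not_or] at hb
        exact h lit hl (by
          simp only [Bool.and_eq_true, Bool.not_eq_true', decide_eq_false_iff_not, not_not]
          exact ⟨hb.1, not_not.mp hb.2⟩)
    by_cases hall2 : (clause.all fun lit =>
        decide (-lit ∈ assignments) || decide (|lit| ∉ assignments.map (fun x => |x|))) = true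
    · rw [if_pos hall2]
      have hS0 : S = [] := hall.mp hall2
      have hSl : S.length = 0 := by rw [hS0]; rfl
      cases hUc : U with
      | nil =>
        rw [if_neg (by simp)]
      | cons a t =>
        cases t with
        | nil =>
          have hU1 : U.length = 1 := by rw [hUc]; rfl
          have hc1 : (F.length : Int) = (clause.length : Int) - 1 := by omega
          rw [if_pos (show ((F.length : Int) = (clause.length : Int) - 1) ∧ ([a].length = 1)
            from ⟨hc1, rfl⟩)]
          rfl
        | cons b t' =>
          rw [if_neg (show ¬(((F.length : Int) = (clause.length : Int) - 1)
              ∧ ((a :: b :: t').length = 1)) by rintro ⟨-, h⟩; simp at h)]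
    · rw [if_neg hall2]
      rw [if_neg (show ¬(((F.length : Int) = (clause.length : Int) - 1) ∧ U.length = 1) by
        rintro ⟨ha, hb⟩
        have hSl : S.length = 0 := by omega
        exact hall2 (hall.mpr (List.length_eq_zero_iff.mp hSl)))]
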